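-- pv_equiv track=rewrite | github.com/Lucasdeversdore/SAE_3.05 | app/csv_to_db.py | get_nombre_unite
-- ===== SOURCE A (Python) =====
-- def get_nombre_unite(quantite):
--     nb = ""
--     quantite = quantite.strip()
--     if quantite == "":
--         return (0, None)
--     for i in range(len(quantite)):
--         try:
--             a = int(quantite[i])
--             nb += quantite[i]
--         except:
--             if quantite[i] == "*":
--                 res = get_nombre_unite(quantite[i+1:])
--                 return (int(nb)*res[0], res[1])
--             else:
--                 return (int(nb), quantite[i:].strip())
--     return (int(quantite), None)
-- ===== SOURCE B (Python) =====
-- def get_nombre_unite(quantite):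
--     product = 1
--     s = quantite.strip()
--     while True:
--         if s == "":
--             return (product * 0, None)
--         i = 0
--         while i < len(s) and s[i] in "0123456789":
--             i += 1
--         if i == len(s):
--             return (product * int(s), None)
--         if s[i] == "*":
--             product *= int(s[:i])
--             s = s[i + 1:].strip()
--         else:
--             return (product * int(s[:i]), s[i:].strip())
-- ===== Notes on version B (the rewrite author's own statement) =====
-- stated objective: simpler
-- what changed: Replaces A's recursion (which rebuilds a digit string char by char under try/except and multiplies on the way back out of each '*' recursion) by a single iterative loop that keeps a running product and finds each maximal digit run with an index scan.
import Mathlib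
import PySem

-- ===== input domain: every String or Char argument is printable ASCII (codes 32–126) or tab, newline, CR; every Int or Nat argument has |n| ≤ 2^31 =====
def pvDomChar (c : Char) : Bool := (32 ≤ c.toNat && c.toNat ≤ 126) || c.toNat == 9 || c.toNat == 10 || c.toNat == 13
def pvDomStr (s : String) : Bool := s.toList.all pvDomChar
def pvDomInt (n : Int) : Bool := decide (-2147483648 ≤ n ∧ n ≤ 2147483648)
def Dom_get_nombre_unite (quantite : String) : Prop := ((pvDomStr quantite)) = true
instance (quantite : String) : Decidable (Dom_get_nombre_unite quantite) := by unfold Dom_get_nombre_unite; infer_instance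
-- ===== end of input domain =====

-- B replaces A's recursion (rebuilding a digit string char by char under try/except) by an
-- iterative loop with a running product and an index scan for the maximal digit run (objective: simpler).

-- Python int(s); 0 only where Python raises ValueError (those inputs are outside Pre_).
def pyInt (cs : List Char) : Int := (PySem.Int.ofChars? cs).getD 0

-- termination helper for both ports: stripping never lengthens a list
theorem strip_length_le (cs : List Char) : (PySem.Chars.strip cs).length ≤ cs.length := by
  unfold PySem.Chars.strip PySem.Chars.lstrip PySem.Chars.rstrip
  simp only [List.length_reverse]
  exact le_trans (List.length_dropWhile_le _ _) (by simpa using List.length_dropWhile_le _ _)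

-- ===== PORT A =====
-- A's for-loop over quantite: `try: int(quantite[i])` succeeds on the ASCII domain exactly
-- for '0'..'9' (PySem.Chars.isdigit).  Returns inl = a return hit inside the loop / at its
-- end, inr (nb, rest) = the '*' branch: recurse on rest, multiply by int(nb).
def aScan (t : List Char) (rest : List Char) (nb : List Char) :
    (Int × Option (List Char)) ⊕ (List Char × List Char) :=
  match rest with
  | [] => Sum.inl (pyInt t, none)                                   -- loop ended: return (int(quantite), None)
  | c :: cs =>
    if PySem.Chars.isdigit c then aScan t cs (nb ++ [c])            -- nb += quantite[i]
    else if c = '*' then Sum.inr (nb, cs)                           -- recurse on quantite[i+1:]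
    else Sum.inl (pyInt nb, some (PySem.Chars.strip (c :: cs)))     -- return (int(nb), quantite[i:].strip())

theorem aScan_inr_length (t : List Char) : ∀ (rest nb nb' r : List Char),
    aScan t rest nb = Sum.inr (nb', r) → r.length < rest.length := by
  intro rest
  induction rest with
  | nil => intro nb nb' r h; simp [aScan] at h
  | cons c cs ih =>
    intro nb nb' r h
    simp only [aScan] at h
    split at h
    · exact Nat.lt_trans (ih _ _ _ h) (Nat.lt_succ_self _)
    · split at h
      · cases h; simp
      · simp at h

def aGo (s : List Char) : Int × Option (List Char) :=
  let t := PySem.Chars.strip s                                      -- quantite = quantite.strip()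
  if t = [] then (0, none)                                          -- if quantite == "": return (0, None)
  else
    match h : aScan t t [] with
    | Sum.inl r => r
    | Sum.inr (nb, rest) =>
      let res := aGo rest                                           -- res = get_nombre_unite(quantite[i+1:])
      (pyInt nb * res.1, res.2)                                     -- (int(nb)*res[0], res[1])
termination_by s.length
decreasing_by
  exact Nat.lt_of_lt_of_le (aScan_inr_length _ _ _ _ _ h) (strip_length_le s)

def get_nombre_unite (quantite : String) : Int × Option String :=
  let r := aGo quantite.toList
  (r.1, r.2.map String.ofList)

-- ===== PORT B =====
-- the inner `while i < len(s) and '0' <= s[i] <= '9': i += 1` scan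
def bDigits (cs : List Char) : Nat :=
  match cs with
  | [] => 0
  | c :: cs => if PySem.Chars.isdigit c then bDigits cs + 1 else 0

def bLoop (product : Int) (s : List Char) : Int × Option (List Char) :=
  if s = [] then (product * 0, none)                                -- return (product * 0, None)
  else
    let i := bDigits s
    if i = s.length then (product * pyInt s, none)                  -- return (product * int(s), None)
    else if s[i]? = some '*' then
      bLoop (product * pyInt (s.take i)) (PySem.Chars.strip (s.drop (i + 1)))
    else (product * pyInt (s.take i), some (PySem.Chars.strip (s.drop i)))
termination_by s.length
decreasing_by
  rename_i hne _ _
  have h1 : (s.drop (bDigits s + 1)).length < s.length := by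
    have : 0 < s.length := List.length_pos_iff.mpr hne
    simp only [List.length_drop]; omega
  exact Nat.lt_of_le_of_lt (strip_length_le _) h1

def get_nombre_unite_alt (quantite : String) : Int × Option String :=
  let r := bLoop 1 (PySem.Chars.strip quantite.toList)
  (r.1, r.2.map String.ofList)

-- ===== PRECONDITION & SPEC =====
-- Pre_ excludes exactly the inputs on which the Python A raises ValueError (int('') or int of a
-- non-digit prefix): some '*'-chained factor, after stripping, is nonempty but does not start
-- with a digit.  B raises there too; no input on which A returns is excluded.
-- Stated as a one-pass state machine (a regular-language condition): state 0 = before a factor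
-- (whitespace allowed, a digit must come before anything else), state 1 = inside a digit run
-- (a non-digit, non-'*' character starts the unit, after which anything is accepted).
def preRun (cs : List Char) (state : Nat) : Bool :=
  match cs with
  | [] => true
  | c :: cs =>
    if state = 0 then
      if PySem.Chars.isspace c then preRun cs 0
      else if PySem.Chars.isdigit c then preRun cs 1
      else false
    else
      if PySem.Chars.isdigit c then preRun cs 1
      else if c = '*' then preRun cs 0
      else true

def Pre_get_nombre_unite (quantite : String) : Prop :=
  preRun quantite.toList 0 = true
instance (quantite : String) : Decidable (Pre_get_nombre_unite quantite) := by
  unfold Pre_get_nombre_unite; infer_instance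

def pvWitness_get_nombre_unite : String := "5* 3 kg"

def Spec_get_nombre_unite (quantite : String) (out : Int × Option String) : Prop := out = get_nombre_unite_alt quantite
instance (quantite : String) (out : Int × Option String) : Decidable (Spec_get_nombre_unite quantite out) := by unfold Spec_get_nombre_unite; infer_instance

-- ===== CLAIM (what is proved, stated in full; the proofs are below) =====
def Claim_equal_get_nombre_unite : Prop := ∀ (quantite : String), Dom_get_nombre_unite quantite → Pre_get_nombre_unite quantite → Spec_get_nombre_unite quantite (get_nombre_unite quantite)

-- ===== LEMMAS AND PROOFS =====

-- A's character loop, characterised by the maximal-digit-run index that B computes.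
theorem aScan_eq (t : List Char) : ∀ (rest nb : List Char),
    aScan t rest nb =
      if bDigits rest = rest.length then Sum.inl (pyInt t, none)
      else if rest[bDigits rest]? = some '*' then
        Sum.inr (nb ++ rest.take (bDigits rest), rest.drop (bDigits rest + 1))
      else Sum.inl (pyInt (nb ++ rest.take (bDigits rest)),
                    some (PySem.Chars.strip (rest.drop (bDigits rest)))) := by
  intro rest
  induction rest with
  | nil => intro nb; simp [aScan, bDigits]
  | cons c cs ih =>
    intro nb
    by_cases hd : PySem.Chars.isdigit c
    · simp only [aScan, hd, if_true, bDigits, List.length_cons, Nat.add_right_cancel_iff,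
        List.getElem?_cons_succ, List.take_succ_cons, List.drop_succ_cons]
      rw [ih (nb ++ [c])]
      simp [List.append_assoc]
    · have hb : bDigits (c :: cs) = 0 := by simp [bDigits, hd]
      have hne : ¬ (bDigits (c :: cs) = (c :: cs).length) := by simp [hb]
      rw [if_neg hne, hb]
      simp only [aScan, hd, Bool.false_eq_true, if_false, List.getElem?_cons_zero,
        List.take_zero, List.append_nil, List.drop_zero]
      by_cases hstar : c = '*'
      · subst hstar; simp
      · rw [if_neg (by simpa using hstar), if_neg (by simpa using hstar)]

theorem bLoop_eq_aGo : ∀ (n : Nat) (s : List Char), s.length ≤ n → ∀ (p : Int),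
    bLoop p (PySem.Chars.strip s) = (p * (aGo s).1, (aGo s).2) := by
  intro n
  induction n with
  | zero =>
    intro s hs p
    have hnil : s = [] := List.length_eq_zero_iff.mp (Nat.le_zero.mp hs)
    subst hnil
    have ht : PySem.Chars.strip ([] : List Char) = [] := by decide
    rw [aGo]; rw [ht]; simp [bLoop]
  | succ n ih =>
    intro s hs p
    rw [aGo]
    set t := PySem.Chars.strip s with ht
    by_cases htn : t = []
    · rw [htn]; simp [bLoop]
    · simp only [htn, if_false]
      have hlen : t.length ≤ s.length := strip_length_le s
      split
      case _ r heq =>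
        rw [aScan_eq] at heq
        split_ifs at heq with h1 h2
        · -- the whole of t is digits: both return (·, None)
          cases heq
          rw [bLoop]
          simp [htn, h1]
        · -- a non-digit, non-'*' character ends the scan
          cases heq
          rw [bLoop]
          simp [htn, h1, h2]
      case _ nb rest heq =>
        rw [aScan_eq] at heq
        split_ifs at heq with h1 h2
        -- only the '*' branch can produce Sum.inr: B folds int(nb) into the product, A multiplies afterwards
        cases heq
        rw [bLoop]
        have hcs : (t.drop (bDigits t + 1)).length ≤ n := by
          have h0 : 0 < t.length := List.length_pos_iff.mpr htn
          simp only [List.length_drop]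
          omega
        rw [if_neg htn, if_neg h1, if_pos h2,
          ih _ hcs (p * pyInt (List.take (bDigits t) t))]
        simp [mul_assoc]

-- ===== VERDICT (by name: the statement is the Claim_ definition above) =====
theorem get_nombre_unite_spec : Claim_equal_get_nombre_unite := by
  intro q _ _
  unfold Spec_get_nombre_unite get_nombre_unite get_nombre_unite_alt
  rw [bLoop_eq_aGo q.toList.length q.toList (le_refl _) 1]
  simp
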